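-- pv_equiv track=rewrite | github.com/u-nivusJO/programmers | PCCP/[PCCP 모의고사 #1] 외톨이 알파벳.py | solution
-- ===== SOURCE A (Python) =====
-- def solution(input_string):
--     answer = ''
--     check=set(input_string)
--     check=sorted(check)
--     for c in check:
--         temp=[]
--         for i in range(len(input_string)):
--             if c==input_string[i]:
--                 temp.append(i)
--         for j in range(1,len(temp)):
--             if temp[j]-1!=temp[j-1]:
--                 answer+=c
--
--                 break
--     if answer=='':
--         answer='N'
--     return answer
-- ===== SOURCE B (Python) =====
-- def solution(input_string):
--     last = {}
--     lonely = set()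
--     for i, c in enumerate(input_string):
--         if c in last and last[c] != i - 1:
--             lonely.add(c)
--         last[c] = i
--     return ''.join(sorted(lonely)) or 'N'
-- ===== Notes on version B (the rewrite author's own statement) =====
-- stated objective: faster
-- what changed: B replaces A's per-distinct-character rescans of the whole string (collect all indices of c, then scan them for a gap) by a single pass over the string that keeps each character's previous index in a dict and flags a character when it reappears at an index other than previous+1, then sorts the flagged set.
import Mathlib
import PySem

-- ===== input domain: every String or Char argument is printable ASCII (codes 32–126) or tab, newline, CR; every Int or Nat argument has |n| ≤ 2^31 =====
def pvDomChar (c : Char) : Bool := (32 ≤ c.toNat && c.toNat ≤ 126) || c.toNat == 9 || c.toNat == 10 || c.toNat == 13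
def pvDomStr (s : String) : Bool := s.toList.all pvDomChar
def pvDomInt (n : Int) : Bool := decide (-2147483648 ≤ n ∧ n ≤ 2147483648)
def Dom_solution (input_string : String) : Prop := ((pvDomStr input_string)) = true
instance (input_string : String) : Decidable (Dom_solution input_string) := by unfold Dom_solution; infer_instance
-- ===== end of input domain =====

-- B replaces A's per-character rescans of the whole string by a single pass that records each
-- character's previous index (gap = previous index ≠ i-1) and then sorts the flagged characters.

-- ===== PORT A =====
-- A's two inner loops for one character c: temp = the indices of c in s, then scan adjacent
-- pairs of temp; the 'break' only decides whether c is appended once, hence `any`.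
def solGap (s : List Char) (c : Char) : Bool :=
  let temp := (PySem.List.pyRange 0 (s.length : Int) 1).foldl
    (fun temp i => if c = PySem.List.pyGetD s i ' ' then temp ++ [i] else temp) ([] : List Int)
  (PySem.List.pyRange 1 (temp.length : Int) 1).any
    (fun j => PySem.List.pyGetD temp j 0 - 1 != PySem.List.pyGetD temp (j - 1) 0)

def solution (input_string : String) : String :=
  let s := input_string.toList
  let check := PySem.List.sorted (PySem.Set.ofList s) (fun x => x) false
  let answer := check.foldl (fun answer c =>
    if solGap s c then answer ++ [c] else answer) ([] : List Char)
  if answer = [] then "N" else String.ofList answer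

-- ===== PORT B =====
-- B's loop body: flag c if it was seen before at an index other than i-1, then record index i.
def solStep (st : PySem.Dict Char Int × PySem.Set Char) (p : Int × Char) :
    PySem.Dict Char Int × PySem.Set Char :=
  let lonely := if st.1.contains p.2 && (st.1.getD p.2 0 != p.1 - 1)
                then PySem.Set.add st.2 p.2 else st.2
  (st.1.insert p.2 p.1, lonely)

def solution_alt (input_string : String) : String :=
  let s := input_string.toList
  let st := (PySem.List.enumerate s 0).foldl solStep (PySem.Dict.empty, PySem.Set.empty)
  let res := PySem.List.sorted st.2 (fun x => x) false
  if res = [] then "N" else String.ofList res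

-- ===== PRECONDITION & SPEC =====
def Spec_solution (input_string : String) (out : String) : Prop := out = solution_alt input_string
instance (input_string : String) (out : String) : Decidable (Spec_solution input_string out) := by unfold Spec_solution; infer_instance

-- ===== CLAIM (what is proved, stated in full; the proofs are below) =====
def Claim_equal_solution : Prop := ∀ (input_string : String), Dom_solution input_string → Spec_solution input_string (solution input_string)

-- ===== LEMMAS AND PROOFS =====

/-- the (0-based) indices at which character `c` occurs in `t`. -/
def occ (t : List Char) (c : Char) : List Int :=
  ((PySem.List.enumerate t 0).filter (fun p => decide (c = p.2))).map (·.1)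

/-- some adjacent pair of `l` differs by more than 1 — the common "lonely" criterion. -/
def HasGap (l : List Int) : Prop :=
  ∃ (j : Nat) (h : j + 1 < l.length), l[j + 1] - 1 ≠ l[j]

lemma occ_append_singleton (t : List Char) (x c : Char) :
    occ (t ++ [x]) c = occ t c ++ (if c = x then [(t.length : Int)] else []) := by
  unfold occ
  rw [PySem.List.enumerate_append]
  simp [PySem.List.enumerate]
  split_ifs <;> simp_all

lemma mem_of_occ_ne_nil {t : List Char} {c : Char} (h : occ t c ≠ []) : c ∈ t := by
  unfold occ at h
  rw [ne_eq, List.map_eq_nil_iff, List.filter_eq_nil_iff] at h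
  push_neg at h
  obtain ⟨p, hm, hp⟩ := h
  obtain ⟨k, hk, rfl⟩ := (PySem.List.mem_enumerate_iff _ _ _).mp hm
  simp at hp
  subst hp
  exact List.getElem_mem hk

lemma hasGap_append_singleton (l : List Int) (v : Int) :
    HasGap (l ++ [v]) ↔ HasGap l ∨ (∃ a, l.getLast? = some a ∧ v - 1 ≠ a) := by
  unfold HasGap
  constructor
  · rintro ⟨j, h, hne⟩
    simp at h
    by_cases hj : j + 1 < l.length
    · left
      refine ⟨j, hj, ?_⟩
      rwa [List.getElem_append_left hj, List.getElem_append_left (by omega)] at hne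
    · right
      have hj1 : j + 1 = l.length := by omega
      have hl : 0 < l.length := by omega
      refine ⟨l[j], ?_, ?_⟩
      · rw [List.getLast?_eq_getElem?]
        have hjj : j = l.length - 1 := by omega
        subst hjj
        rw [List.getElem?_eq_getElem (by omega)]
      · have h1 : (l ++ [v])[j + 1] = v := by
          rw [List.getElem_append_right (by omega)]
          simp [hj1]
        have h2 : (l ++ [v])[j]'(by simp; omega) = l[j] := List.getElem_append_left (by omega)
        rw [h1, h2] at hne
        exact hne
  · rintro (⟨j, h, hne⟩ | ⟨a, ha, hne⟩)
    · refine ⟨j, by simp; omega, ?_⟩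
      rwa [List.getElem_append_left (by omega), List.getElem_append_left (by omega)]
    · have hl : 0 < l.length := by
        cases l with
        | nil => simp at ha
        | cons => simp
      refine ⟨l.length - 1, by simp; omega, ?_⟩
      have h1 : (l ++ [v])[l.length - 1 + 1]'(by simp; omega) = v := by
        rw [List.getElem_append_right (by omega)]
        simp [show l.length - 1 + 1 - l.length = 0 from by omega]
      have h2 : (l ++ [v])[l.length - 1]'(by simp) = a := by
        rw [List.getElem_append_left (by omega)]
        rw [List.getLast?_eq_getElem?, List.getElem?_eq_getElem (by omega)] at ha
        exact Option.some_injective _ ha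
      rw [h1, h2]
      exact hne

lemma pyGetD_toNat (l : List Int) (i : Int) (h : 0 ≤ i) :
    PySem.List.pyGetD l i 0 = l.getD i.toNat 0 := by
  obtain ⟨n, rfl⟩ : ∃ n : Nat, i = (n : Int) := ⟨i.toNat, by omega⟩
  rw [PySem.List.pyGetD_natCast]
  simp

lemma any_gap_iff (l : List Int) :
    ((PySem.List.pyRange 1 (l.length : Int) 1).any
      (fun j => PySem.List.pyGetD l j 0 - 1 != PySem.List.pyGetD l (j - 1) 0) = true)
    ↔ HasGap l := by
  rw [List.any_eq_true]
  constructor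
  · rintro ⟨j, hm, hj⟩
    rw [PySem.List.mem_pyRange_one] at hm
    obtain ⟨h1, h2⟩ := hm
    rw [pyGetD_toNat l j (by omega), pyGetD_toNat l (j - 1) (by omega), bne_iff_ne] at hj
    have e2 : (j - 1).toNat = j.toNat - 1 := by omega
    rw [e2] at hj
    refine ⟨j.toNat - 1, by omega, ?_⟩
    rw [← List.getD_eq_getElem l 0 (by omega), ← List.getD_eq_getElem l 0 (by omega),
        show j.toNat - 1 + 1 = j.toNat from by omega]
    exact hj
  · rintro ⟨j, h, hne⟩
    refine ⟨(j : Int) + 1, ?_, ?_⟩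
    · rw [PySem.List.mem_pyRange_one]
      constructor <;> omega
    · rw [pyGetD_toNat l _ (by omega), pyGetD_toNat l _ (by omega), bne_iff_ne,
          show ((j : Int) + 1).toNat = j + 1 from by omega,
          show ((j : Int) + 1 - 1).toNat = j from by omega,
          List.getD_eq_getElem l 0 (by omega), List.getD_eq_getElem l 0 (by omega)]
      exact hne

lemma temp_eq_occ (s : List Char) (c : Char) :
    (PySem.List.pyRange 0 (s.length : Int) 1).foldl
      (fun temp i => if c = PySem.List.pyGetD s i ' ' then temp ++ [i] else temp) ([] : List Int)
    = occ s c := by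
  rw [PySem.List.foldl_append_ite_eq_filter (fun i => c = PySem.List.pyGetD s i ' ')]
  unfold occ
  rw [PySem.List.enumerate_eq_map_pyRange s ' ']
  rw [List.filter_map, List.map_map]
  simp only [Function.comp_def]
  simp [PySem.List.len]

lemma solGap_iff (s : List Char) (c : Char) : solGap s c = true ↔ HasGap (occ s c) := by
  unfold solGap
  simp only [temp_eq_occ]
  exact any_gap_iff _

lemma bfold_inv (t : List Char) :
    (∀ c, ((PySem.List.enumerate t 0).foldl solStep (PySem.Dict.empty, PySem.Set.empty)).1.get? c
        = (occ t c).getLast?) ∧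
    ((PySem.List.enumerate t 0).foldl solStep (PySem.Dict.empty, PySem.Set.empty)).2.Nodup ∧
    (∀ c, c ∈ ((PySem.List.enumerate t 0).foldl solStep (PySem.Dict.empty, PySem.Set.empty)).2
        ↔ HasGap (occ t c)) := by
  induction t using List.reverseRecOn with
  | nil =>
    refine ⟨fun c => ?_, ?_, fun c => ?_⟩ <;>
      simp [PySem.List.enumerate, occ, HasGap, PySem.Dict.get?, PySem.Dict.empty, PySem.Set.empty]
  | append_singleton t x ih =>
    obtain ⟨ih1, ih2, ih3⟩ := ih
    rw [PySem.List.enumerate_append]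
    simp only [PySem.List.enumerate, List.foldl_append]
    set st := (PySem.List.enumerate t 0).foldl solStep (PySem.Dict.empty, PySem.Set.empty) with hst
    simp only [List.foldl_cons, List.foldl_nil]
    have hzero : (0 : Int) + (t.length : Int) = (t.length : Int) := by omega
    rw [hzero]
    unfold solStep
    simp only []
    constructor
    · intro c
      rw [PySem.Dict.get?_insert]
      rw [occ_append_singleton]
      by_cases hc : c = x
      · subst hc; simp
      · simp [hc, ih1 c]
    constructor
    · split_ifs with h
      · exact PySem.Set.nodup_add st.2 x ih2
      · exact ih2
    · intro c
      rw [occ_append_singleton]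
      by_cases hc : c = x
      · subst hc
        simp only [if_true]
        rw [hasGap_append_singleton, ← ih3 c]
        have hcont : st.1.contains c = ((occ t c).getLast?).isSome := by
          rw [PySem.Dict.contains_eq_isSome_get?, ih1 c]
        split_ifs with h
        · rw [PySem.Set.mem_add]
          simp only [Bool.and_eq_true, bne_iff_ne] at h
          obtain ⟨h1, h2⟩ := h
          rw [hcont] at h1
          obtain ⟨a, ha⟩ := Option.isSome_iff_exists.mp h1
          have hgd : st.1.getD c 0 = a := by
            rw [PySem.Dict.getD_eq_get?_getD, ih1 c, ha]; rfl
          constructor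
          · intro _; right; exact ⟨a, ha, by rw [hgd] at h2; omega⟩
          · intro _; right; rfl
        · simp only [Bool.and_eq_true, bne_iff_ne, not_and_or, not_not] at h
          constructor
          · intro hm; left; exact hm
          · rintro (hg | ⟨a, ha, hne⟩)
            · exact hg
            · exfalso
              rcases h with h1 | h2
              · rw [hcont, ha] at h1; simp at h1
              · have hgd : st.1.getD c 0 = a := by
                  rw [PySem.Dict.getD_eq_get?_getD, ih1 c, ha]; rfl
                rw [hgd] at h2; omega
      · simp only [if_neg hc, List.append_nil]
        rw [← ih3 c]
        split_ifs with h
        · rw [PySem.Set.mem_add]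
          constructor
          · rintro (hm | he)
            · exact hm
            · exact absurd he hc
          · intro hm; left; exact hm
        · rfl

-- ===== VERDICT (by name: the statement is the Claim_ definition above) =====
theorem solution_spec : Claim_equal_solution := by
  intro input_string _
  unfold Spec_solution solution solution_alt
  simp only []
  set s := input_string.toList with hs
  set check := PySem.List.sorted (PySem.Set.ofList s) (fun x => x) false with hcheck
  obtain ⟨-, hnd, hmem⟩ := bfold_inv s
  set lonely := ((PySem.List.enumerate s 0).foldl solStep (PySem.Dict.empty, PySem.Set.empty)).2
  rw [PySem.List.foldl_append_if_eq_filter (solGap s) check []]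
  have hpw : (check.filter (solGap s)).Pairwise (· < ·) :=
    (PySem.List.sorted_ofList_pairwise_lt s).filter _
  have hndf : (check.filter (solGap s)).Nodup := hpw.imp (fun h => ne_of_lt h)
  have hperm : (check.filter (solGap s)).Perm lonely := by
    rw [List.perm_ext_iff_of_nodup hndf hnd]
    intro c
    rw [List.mem_filter, hmem c, solGap_iff]
    constructor
    · rintro ⟨-, hg⟩; exact hg
    · intro hg
      refine ⟨?_, hg⟩
      rw [hcheck, PySem.List.mem_sorted, PySem.Set.mem_ofList]
      apply mem_of_occ_ne_nil
      obtain ⟨j, hj, -⟩ := hg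
      intro hnil
      rw [hnil] at hj
      simp at hj
  have hkey : PySem.List.sorted lonely (fun x => x) false = check.filter (solGap s) :=
    PySem.List.sorted_eq_of_perm_of_pairwise_lt lonely (check.filter (solGap s)) _ hperm hpw
  rw [hkey]
  simp
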